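-- pv_equiv track=rewrite | github.com/koii-network/prometheus-beta | src/longest_parity_subsequence.py | longest_parity_subsequence
-- ===== SOURCE A (Python) =====
-- def longest_parity_subsequence(arr):
--     """
--     Find the longest subsequence with the same parity (all even or all odd).
--
--     Args:
--         arr (list): A list of integers
--
--     Returns:
--         list: The longest subsequence with consistent parity
--
--     Raises:
--         ValueError: If input is not a list or is an empty list
--     """
--     if not isinstance(arr, list):
--         raise ValueError("Input must be a list")
--
--     if not arr:
--         return []
--
--     # Track longest even and odd subsequences
--     longest_even = []
--     longest_odd = []
--
--     # Current subsequence candidates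
--     current_even = []
--     current_odd = []
--
--     for num in arr:
--         if num % 2 == 0:  # Even number
--             # Extend current even sequence or start a new one
--             current_even.append(num)
--             current_odd = []  # Reset odd sequence
--
--             # Update longest even sequence if needed
--             if len(current_even) > len(longest_even):
--                 longest_even = current_even.copy()
--
--         else:  # Odd number
--             # Extend current odd sequence or start a new one
--             current_odd.append(num)
--             current_even = []  # Reset even sequence
--
--             # Update longest odd sequence if needed
--             if len(current_odd) > len(longest_odd):
--                 longest_odd = current_odd.copy()
--
--     # Return the longer subsequence
--     return longest_even if len(longest_even) >= len(longest_odd) else longest_odd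
-- ===== SOURCE B (Python) =====
-- def longest_parity_subsequence(arr):
--     # One pass over indices: track the start of the current same-parity run and
--     # the best (start, length) per parity; slice the input once at the end.
--     best_even = (0, 0)  # (start, length) of first longest even run
--     best_odd = (0, 0)   # (start, length) of first longest odd run
--     run_start = 0
--     for i, num in enumerate(arr):
--         if i > 0 and arr[i - 1] % 2 != num % 2:
--             run_start = i
--         run_len = i - run_start + 1
--         if num % 2 == 0:
--             if run_len > best_even[1]:
--                 best_even = (run_start, run_len)
--         else:
--             if run_len > best_odd[1]:
--                 best_odd = (run_start, run_len)
--     start, n = best_even if best_even[1] >= best_odd[1] else best_odd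
--     return arr[start:start + n]
-- ===== Notes on version B (the rewrite author's own statement) =====
-- stated objective: faster
-- what changed: Replaces A's four growing list accumulators with list copies on every improvement by a single index-based pass that tracks (start, length) of the current run and of the best run per parity, slicing the input once at the end.
import Mathlib
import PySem

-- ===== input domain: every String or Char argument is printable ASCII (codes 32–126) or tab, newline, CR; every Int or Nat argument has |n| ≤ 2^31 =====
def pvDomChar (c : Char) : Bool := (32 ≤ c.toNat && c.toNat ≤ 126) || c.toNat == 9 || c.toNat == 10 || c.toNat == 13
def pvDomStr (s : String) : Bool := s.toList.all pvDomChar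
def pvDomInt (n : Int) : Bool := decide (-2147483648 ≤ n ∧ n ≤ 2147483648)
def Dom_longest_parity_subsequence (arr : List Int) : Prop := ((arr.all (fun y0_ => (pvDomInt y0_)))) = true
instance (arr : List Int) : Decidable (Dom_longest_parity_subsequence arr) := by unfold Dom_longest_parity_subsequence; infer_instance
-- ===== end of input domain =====

-- B replaces A's four list accumulators (copied on every improvement) by one index pass
-- tracking (start, length) per parity, slicing once at the end: measured faster, same values.


-- ===== PORT A =====
-- state: (longest_even, longest_odd, current_even, current_odd)
def stepA (st : List Int × List Int × List Int × List Int) (num : Int) :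
    List Int × List Int × List Int × List Int :=
  let (le, lo, ce, co) := st
  if PySem.Int.mod num 2 = 0 then
    let ce' := ce ++ [num]
    let le' := if le.length < ce'.length then ce' else le
    (le', lo, ce', [])
  else
    let co' := co ++ [num]
    let lo' := if lo.length < co'.length then co' else lo
    (le, lo', [], co')

def longest_parity_subsequence (arr : List Int) : List Int :=
  if arr = [] then []
  else
    let st := arr.foldl stepA ([], [], [], [])
    if st.2.1.length ≤ st.1.length then st.1 else st.2.1

-- ===== PORT B =====
-- state: (run_start, best_even = (start, len), best_odd = (start, len))
def stepB (arr : List Int) (st : Int × (Int × Int) × (Int × Int)) (p : Int × Int) :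
    Int × (Int × Int) × (Int × Int) :=
  let (rs, be, bo) := st
  let (i, num) := p
  let rs' := if 0 < i ∧ PySem.Int.mod (PySem.List.pyGetD arr (i - 1) 0) 2 ≠ PySem.Int.mod num 2
             then i else rs
  let rl := i - rs' + 1
  if PySem.Int.mod num 2 = 0 then
    (rs', (if be.2 < rl then (rs', rl) else be), bo)
  else
    (rs', be, (if bo.2 < rl then (rs', rl) else bo))

def longest_parity_subsequence_alt (arr : List Int) : List Int :=
  let st := (PySem.List.enumerate arr 0).foldl (stepB arr) (0, (0, 0), (0, 0))
  let p := if st.2.2.2 ≤ st.2.1.2 then st.2.1 else st.2.2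
  PySem.List.slice arr (some p.1) (some (p.1 + p.2))

-- ===== PRECONDITION & SPEC =====
def Spec_longest_parity_subsequence (arr : List Int) (out : List Int) : Prop := out = longest_parity_subsequence_alt arr
instance (arr : List Int) (out : List Int) : Decidable (Spec_longest_parity_subsequence arr out) := by unfold Spec_longest_parity_subsequence; infer_instance

-- ===== CLAIM (what is proved, stated in full; the proofs are below) =====
def Claim_equal_longest_parity_subsequence : Prop := ∀ (arr : List Int), Dom_longest_parity_subsequence arr → Spec_longest_parity_subsequence arr (longest_parity_subsequence arr)

-- ===== LEMMAS AND PROOFS =====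

-- joint loop invariant: A's best/current lists are the slices named by B's indices
def InvLPS (arr : List Int) : Prop :=
  ∃ (rsN seN neN soN noN : Nat),
    (((PySem.List.enumerate arr 0).foldl (stepB arr) (0, (0, 0), (0, 0)) =
        ((rsN : Int), ((seN : Int), (neN : Int)), ((soN : Int), (noN : Int)))) ∧
     seN + neN ≤ arr.length ∧ soN + noN ≤ arr.length ∧
     (arr.foldl stepA ([], [], [], [])).1 = (arr.drop seN).take neN ∧
     (arr.foldl stepA ([], [], [], [])).2.1 = (arr.drop soN).take noN ∧
     (arr = [] → rsN = 0 ∧ (arr.foldl stepA ([], [], [], [])).2.2.1 = [] ∧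
                 (arr.foldl stepA ([], [], [], [])).2.2.2 = []) ∧
     (arr ≠ [] → rsN < arr.length ∧
        (if PySem.Int.mod (arr.getD (arr.length - 1) 0) 2 = 0
         then (arr.foldl stepA ([], [], [], [])).2.2.1 = arr.drop rsN ∧
              (arr.foldl stepA ([], [], [], [])).2.2.2 = []
         else (arr.foldl stepA ([], [], [], [])).2.2.2 = arr.drop rsN ∧
              (arr.foldl stepA ([], [], [], [])).2.2.1 = [])))

lemma stepB_ext (a b : List Int) (xs : List (Int × Int))
    (h : ∀ p ∈ xs, 0 < p.1 → PySem.List.pyGetD a (p.1 - 1) (0:Int) = PySem.List.pyGetD b (p.1 - 1) 0)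
    (st : Int × (Int × Int) × (Int × Int)) :
    xs.foldl (stepB a) st = xs.foldl (stepB b) st := by
  induction xs generalizing st with
  | nil => rfl
  | cons p xs ih =>
      have hstep : stepB a st p = stepB b st p := by
        by_cases hp : 0 < p.1
        · simp [stepB, h p (by simp) hp]
        · simp [stepB, hp]
      simp only [List.foldl_cons, hstep]
      exact ih (fun q hq h0 => h q (by simp [hq]) h0) _

lemma take_drop_length (xs : List Int) (s n : Nat) (h : s + n ≤ xs.length) :
    ((xs.drop s).take n).length = n := by
  simp [List.length_take, List.length_drop]; omega

lemma slice_append_stable (xs : List Int) (x : Int) (s n : Nat) (h : s + n ≤ xs.length) :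
    ((xs ++ [x]).drop s).take n = (xs.drop s).take n := by
  rw [List.drop_append_of_le_length (by omega), List.take_append_of_le_length]
  simp [List.length_drop]; omega

lemma invLPS (arr : List Int) : InvLPS arr := by
  induction arr using List.reverseRecOn with
  | nil =>
      refine ⟨0, 0, 0, 0, 0, ?_⟩
      simp [PySem.List.enumerate]
  | append_singleton arr x ih =>
      obtain ⟨rsN, seN, neN, soN, noN, hB, hse, hso, hle, hlo, hnil, hcons⟩ := ih
      have hfA : (arr ++ [x]).foldl stepA ([], [], [], []) =
          stepA (arr.foldl stepA ([], [], [], [])) x := by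
        rw [List.foldl_append]; rfl
      rcases hA : arr.foldl stepA ([], [], [], []) with ⟨le, lo, ce, co⟩
      rw [hA] at hle hlo hnil hcons hfA
      dsimp only at hle hlo hnil hcons
      have hen : PySem.List.enumerate (arr ++ [x]) 0 =
          PySem.List.enumerate arr 0 ++ [((arr.length : Int), x)] := by
        rw [PySem.List.enumerate_append]
        simp [PySem.List.enumerate_cons, PySem.List.enumerate_nil]
      have hext : (PySem.List.enumerate arr 0).foldl (stepB (arr ++ [x])) (0, (0, 0), (0, 0)) =
          (PySem.List.enumerate arr 0).foldl (stepB arr) (0, (0, 0), (0, 0)) := by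
        apply stepB_ext
        intro p hp h0
        rw [PySem.List.mem_enumerate_iff] at hp
        obtain ⟨k, hk, rfl⟩ := hp
        dsimp only at h0 ⊢
        have hk0 : 0 < k := by
          have : (0:Int) < 0 + (k:Int) := h0
          omega
        have h1 : (0 : Int) + (k : Int) - 1 = ((k - 1 : Nat) : Int) := by push_cast [hk0]; omega
        rw [h1, PySem.List.pyGetD_natCast, PySem.List.pyGetD_natCast,
          List.getD_append _ _ _ _ (by omega)]
      have hfB : (PySem.List.enumerate (arr ++ [x]) 0).foldl (stepB (arr ++ [x])) (0, (0, 0), (0, 0)) =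
          stepB (arr ++ [x]) ((rsN : Int), ((seN : Int), (neN : Int)), ((soN : Int), (noN : Int)))
            ((arr.length : Int), x) := by
        rw [hen, List.foldl_append, hext, hB]; rfl
      subst hle hlo
      unfold InvLPS
      rw [hfA, hfB]
      by_cases hA0 : arr = []
      · subst hA0
        obtain ⟨hrs, hce, hco⟩ := hnil rfl
        simp only [List.length_nil, Nat.le_zero, Nat.add_eq_zero_iff] at hse hso
        obtain ⟨hse1, hne1⟩ := hse
        obtain ⟨hso1, hno1⟩ := hso
        subst hrs hce hco hse1 hne1 hso1 hno1
        by_cases hx : PySem.Int.mod x 2 = 0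
        · have hx2 : (2:Int) ∣ x := (PySem.Int.mod_eq_zero_iff_dvd x 2).mp hx
          refine ⟨0, 0, 1, 0, 0, ?_⟩
          simp [stepA, stepB, hx2]
        · have hx1 : x % 2 = 1 := by
            rw [PySem.Int.mod_eq_emod_of_pos (by norm_num)] at hx; omega
          have hx2 : ¬ (2:Int) ∣ x := by omega
          refine ⟨0, 0, 0, 0, 1, ?_⟩
          simp [stepA, stepB, hx1, hx2]
      · obtain ⟨hrsL, hrun⟩ := hcons hA0
        have hL0 : 0 < arr.length := List.length_pos_of_ne_nil hA0
        have hlast : PySem.List.pyGetD (arr ++ [x]) ((arr.length : Int) - 1) 0 =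
            arr.getD (arr.length - 1) 0 := by
          have h1 : ((arr.length : Int) - 1) = ((arr.length - 1 : Nat) : Int) := by omega
          rw [h1, PySem.List.pyGetD_natCast, List.getD_append _ _ _ _ (by omega)]
        have hlastx : (arr ++ [x]).getD (arr.length + 1 - 1) 0 = x := by
          simp
        have hnil' : ¬ (arr ++ [x] = []) := by simp
        have hL1 : (arr ++ [x]).length = arr.length + 1 := by simp
        by_cases hx : PySem.Int.mod x 2 = 0
        · by_cases hq : PySem.Int.mod (arr.getD (arr.length - 1) 0) 2 = 0
          · -- x even, run even: continue
            rw [if_pos hq] at hrun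
            obtain ⟨hce, hco⟩ := hrun
            subst hce hco
            have hx' : PySem.Int.mod x 2 = 0 := hx
            have hq' : PySem.Int.mod (arr.getD (arr.length - 1) 0) 2 = 0 := hq
            have hcond : ¬ (0 < (arr.length:Int) ∧
                ¬ PySem.Int.mod (PySem.List.pyGetD (arr ++ [x]) ((arr.length:Int) - 1) 0) 2 =
                  PySem.Int.mod x 2) := by
              rw [hlast]
              intro hh
              exact hh.2 (by rw [hq', hx'])
            have hsB : stepB (arr ++ [x])
                ((rsN : Int), ((seN : Int), (neN : Int)), ((soN : Int), (noN : Int)))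
                ((arr.length : Int), x) = ((rsN : Int), (if (neN : Int) < (arr.length : Int) - (rsN : Int) + 1 then ((rsN : Int), (arr.length : Int) - (rsN : Int) + 1) else ((seN : Int), (neN : Int))), ((soN : Int), (noN : Int))) := by
              simp only [stepB]
              rw [if_neg hcond]
              try rw [if_pos hx]
            have hsA : stepA (List.take neN (List.drop seN arr), List.take noN (List.drop soN arr), List.drop rsN arr, []) x = ((if (List.take neN (List.drop seN arr)).length < (List.drop rsN arr ++ [x]).length then List.drop rsN arr ++ [x] else List.take neN (List.drop seN arr)), List.take noN (List.drop soN arr), List.drop rsN arr ++ [x], []) := by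
              simp only [stepA]
              try rw [if_pos hx]
            rw [hsA, hsB]
            have hlenA : (List.take neN (List.drop seN arr)).length = neN := take_drop_length _ _ _ hse
            have hlenC : (List.drop rsN arr ++ [x]).length = (arr.length - rsN + 1) := by simp only [List.length_append, List.length_drop, List.length_cons, List.length_nil]; try omega
            have htk : List.take (arr.length - rsN + 1) (List.drop rsN (arr ++ [x])) = List.drop rsN (arr ++ [x]) :=
              List.take_of_length_le (by simp only [List.length_drop, List.length_append, List.length_cons, List.length_nil]; omega)
            have hdx : List.drop rsN arr ++ [x] = (arr ++ [x]).drop rsN := by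
              rw [List.drop_append_of_le_length (by omega)]
            by_cases hu : neN < (arr.length - rsN + 1)
            · have hcmpI : ((neN : Nat) : Int) < (arr.length : Int) - (rsN : Int) + 1 := by omega
              have hcmpL : (List.take neN (List.drop seN arr)).length < (List.drop rsN arr ++ [x]).length := by
                rw [hlenA, hlenC]; exact hu
              refine ⟨rsN, rsN, (arr.length - rsN + 1), soN, noN, ?_, ?_, ?_, ?_, ?_, ?_, ?_⟩
              · have hcast : (((arr.length - rsN + 1) : Nat) : Int) = (arr.length : Int) - (rsN : Int) + 1 := by omega
                rw [if_pos hcmpI, hcast]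
              · rw [hL1]; try omega
              · rw [hL1]; try omega
              · rw [if_pos hcmpL]
                try dsimp only
                rw [htk, hdx]
              · try dsimp only
                exact (slice_append_stable arr x soN noN hso).symm
              · intro hcontra; exact absurd hcontra hnil'
              · intro _
                rw [hL1]
                refine ⟨by omega, ?_⟩
                rw [hlastx, if_pos hx]
                constructor <;> simp [hdx]
            · have hcmpI : ¬ (((neN : Nat) : Int) < (arr.length : Int) - (rsN : Int) + 1) := by omega
              have hcmpL' : ¬ ((List.take neN (List.drop seN arr)).length < (List.drop rsN arr ++ [x]).length) := by
                rw [hlenA, hlenC]; exact hu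
              refine ⟨rsN, seN, neN, soN, noN, ?_, ?_, ?_, ?_, ?_, ?_, ?_⟩
              · rw [if_neg hcmpI]
              · rw [hL1]; try omega
              · rw [hL1]; try omega
              · rw [if_neg hcmpL']
                try dsimp only
                exact (slice_append_stable arr x seN neN hse).symm
              · try dsimp only
                exact (slice_append_stable arr x soN noN hso).symm
              · intro hcontra; exact absurd hcontra hnil'
              · intro _
                rw [hL1]
                refine ⟨by omega, ?_⟩
                rw [hlastx, if_pos hx]
                constructor <;> simp [hdx]
          · -- x even, run odd: new run
            rw [if_neg hq] at hrun
            obtain ⟨hce, hco⟩ := hrun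
            subst hce hco
            have hx' : PySem.Int.mod x 2 = 0 := hx
            have hq' : PySem.Int.mod (arr.getD (arr.length - 1) 0) 2 = 1 := by
              rw [PySem.Int.mod_eq_emod_of_pos (by norm_num)] at hq ⊢; omega
            have hcond : (0 < (arr.length:Int) ∧
                ¬ PySem.Int.mod (PySem.List.pyGetD (arr ++ [x]) ((arr.length:Int) - 1) 0) 2 =
                  PySem.Int.mod x 2) := by
              rw [hlast]
              exact ⟨by exact_mod_cast hL0, by rw [hq', hx']; norm_num⟩
            have hsB : stepB (arr ++ [x])
                ((rsN : Int), ((seN : Int), (neN : Int)), ((soN : Int), (noN : Int)))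
                ((arr.length : Int), x) = ((arr.length : Int), (if (neN : Int) < (arr.length : Int) - (arr.length : Int) + 1 then ((arr.length : Int), (arr.length : Int) - (arr.length : Int) + 1) else ((seN : Int), (neN : Int))), ((soN : Int), (noN : Int))) := by
              simp only [stepB]
              rw [if_pos hcond]
              try rw [if_pos hx]
            have hsA : stepA (List.take neN (List.drop seN arr), List.take noN (List.drop soN arr), [], List.drop rsN arr) x = ((if (List.take neN (List.drop seN arr)).length < ([] ++ [x]).length then [] ++ [x] else List.take neN (List.drop seN arr)), List.take noN (List.drop soN arr), [] ++ [x], []) := by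
              simp only [stepA]
              try rw [if_pos hx]
            rw [hsA, hsB]
            have hlenA : (List.take neN (List.drop seN arr)).length = neN := take_drop_length _ _ _ hse
            have hlenC : ([] ++ [x]).length = 1 := by simp only [List.length_append, List.length_drop, List.length_cons, List.length_nil]; try omega
            have htk : List.take 1 (List.drop arr.length (arr ++ [x])) = List.drop arr.length (arr ++ [x]) :=
              List.take_of_length_le (by simp only [List.length_drop, List.length_append, List.length_cons, List.length_nil]; omega)
            have hdx : [] ++ [x] = (arr ++ [x]).drop arr.length := by
              rw [List.drop_append_of_le_length (by omega)]
              simp [List.drop_length]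
            by_cases hu : neN < 1
            · have hcmpI : ((neN : Nat) : Int) < (arr.length : Int) - (arr.length : Int) + 1 := by omega
              have hcmpL : (List.take neN (List.drop seN arr)).length < ([] ++ [x]).length := by
                rw [hlenA, hlenC]; exact hu
              refine ⟨arr.length, arr.length, 1, soN, noN, ?_, ?_, ?_, ?_, ?_, ?_, ?_⟩
              · have hcast : ((1 : Nat) : Int) = (arr.length : Int) - (arr.length : Int) + 1 := by omega
                rw [if_pos hcmpI, hcast]
              · rw [hL1]; try omega
              · rw [hL1]; try omega
              · rw [if_pos hcmpL]
                try dsimp only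
                rw [htk, hdx]
              · try dsimp only
                exact (slice_append_stable arr x soN noN hso).symm
              · intro hcontra; exact absurd hcontra hnil'
              · intro _
                rw [hL1]
                refine ⟨by omega, ?_⟩
                rw [hlastx, if_pos hx]
                constructor <;> simp [hdx]
            · have hcmpI : ¬ (((neN : Nat) : Int) < (arr.length : Int) - (arr.length : Int) + 1) := by omega
              have hcmpL' : ¬ ((List.take neN (List.drop seN arr)).length < ([] ++ [x]).length) := by
                rw [hlenA, hlenC]; exact hu
              refine ⟨arr.length, seN, neN, soN, noN, ?_, ?_, ?_, ?_, ?_, ?_, ?_⟩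
              · rw [if_neg hcmpI]
              · rw [hL1]; try omega
              · rw [hL1]; try omega
              · rw [if_neg hcmpL']
                try dsimp only
                exact (slice_append_stable arr x seN neN hse).symm
              · try dsimp only
                exact (slice_append_stable arr x soN noN hso).symm
              · intro hcontra; exact absurd hcontra hnil'
              · intro _
                rw [hL1]
                refine ⟨by omega, ?_⟩
                rw [hlastx, if_pos hx]
                constructor <;> simp [hdx]
        · by_cases hq : PySem.Int.mod (arr.getD (arr.length - 1) 0) 2 = 0
          · -- x odd, run even: new run
            rw [if_pos hq] at hrun
            obtain ⟨hce, hco⟩ := hrun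
            subst hce hco
            have hx' : PySem.Int.mod x 2 = 1 := by
              rw [PySem.Int.mod_eq_emod_of_pos (by norm_num)] at hx ⊢; omega
            have hq' : PySem.Int.mod (arr.getD (arr.length - 1) 0) 2 = 0 := hq
            have hcond : (0 < (arr.length:Int) ∧
                ¬ PySem.Int.mod (PySem.List.pyGetD (arr ++ [x]) ((arr.length:Int) - 1) 0) 2 =
                  PySem.Int.mod x 2) := by
              rw [hlast]
              exact ⟨by exact_mod_cast hL0, by rw [hq', hx']; norm_num⟩
            have hsB : stepB (arr ++ [x])
                ((rsN : Int), ((seN : Int), (neN : Int)), ((soN : Int), (noN : Int)))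
                ((arr.length : Int), x) = ((arr.length : Int), ((seN : Int), (neN : Int)), (if (noN : Int) < (arr.length : Int) - (arr.length : Int) + 1 then ((arr.length : Int), (arr.length : Int) - (arr.length : Int) + 1) else ((soN : Int), (noN : Int)))) := by
              simp only [stepB]
              rw [if_pos hcond]
              try rw [if_neg hx]
            have hsA : stepA (List.take neN (List.drop seN arr), List.take noN (List.drop soN arr), List.drop rsN arr, []) x = (List.take neN (List.drop seN arr), (if (List.take noN (List.drop soN arr)).length < ([] ++ [x]).length then [] ++ [x] else List.take noN (List.drop soN arr)), [], [] ++ [x]) := by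
              simp only [stepA]
              try rw [if_neg hx]
            rw [hsA, hsB]
            have hlenA : (List.take noN (List.drop soN arr)).length = noN := take_drop_length _ _ _ hso
            have hlenC : ([] ++ [x]).length = 1 := by simp only [List.length_append, List.length_drop, List.length_cons, List.length_nil]; try omega
            have htk : List.take 1 (List.drop arr.length (arr ++ [x])) = List.drop arr.length (arr ++ [x]) :=
              List.take_of_length_le (by simp only [List.length_drop, List.length_append, List.length_cons, List.length_nil]; omega)
            have hdx : [] ++ [x] = (arr ++ [x]).drop arr.length := by
              rw [List.drop_append_of_le_length (by omega)]
              simp [List.drop_length]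
            by_cases hu : noN < 1
            · have hcmpI : ((noN : Nat) : Int) < (arr.length : Int) - (arr.length : Int) + 1 := by omega
              have hcmpL : (List.take noN (List.drop soN arr)).length < ([] ++ [x]).length := by
                rw [hlenA, hlenC]; exact hu
              refine ⟨arr.length, seN, neN, arr.length, 1, ?_, ?_, ?_, ?_, ?_, ?_, ?_⟩
              · have hcast : ((1 : Nat) : Int) = (arr.length : Int) - (arr.length : Int) + 1 := by omega
                rw [if_pos hcmpI, hcast]
              · rw [hL1]; try omega
              · rw [hL1]; try omega
              · try dsimp only
                exact (slice_append_stable arr x seN neN hse).symm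
              · rw [if_pos hcmpL]
                try dsimp only
                rw [htk, hdx]
              · intro hcontra; exact absurd hcontra hnil'
              · intro _
                rw [hL1]
                refine ⟨by omega, ?_⟩
                rw [hlastx, if_neg hx]
                constructor <;> simp [hdx]
            · have hcmpI : ¬ (((noN : Nat) : Int) < (arr.length : Int) - (arr.length : Int) + 1) := by omega
              have hcmpL' : ¬ ((List.take noN (List.drop soN arr)).length < ([] ++ [x]).length) := by
                rw [hlenA, hlenC]; exact hu
              refine ⟨arr.length, seN, neN, soN, noN, ?_, ?_, ?_, ?_, ?_, ?_, ?_⟩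
              · rw [if_neg hcmpI]
              · rw [hL1]; try omega
              · rw [hL1]; try omega
              · try dsimp only
                exact (slice_append_stable arr x seN neN hse).symm
              · rw [if_neg hcmpL']
                try dsimp only
                exact (slice_append_stable arr x soN noN hso).symm
              · intro hcontra; exact absurd hcontra hnil'
              · intro _
                rw [hL1]
                refine ⟨by omega, ?_⟩
                rw [hlastx, if_neg hx]
                constructor <;> simp [hdx]
          · -- x odd, run odd: continue
            rw [if_neg hq] at hrun
            obtain ⟨hce, hco⟩ := hrun
            subst hce hco
            have hx' : PySem.Int.mod x 2 = 1 := by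
              rw [PySem.Int.mod_eq_emod_of_pos (by norm_num)] at hx ⊢; omega
            have hq' : PySem.Int.mod (arr.getD (arr.length - 1) 0) 2 = 1 := by
              rw [PySem.Int.mod_eq_emod_of_pos (by norm_num)] at hq ⊢; omega
            have hcond : ¬ (0 < (arr.length:Int) ∧
                ¬ PySem.Int.mod (PySem.List.pyGetD (arr ++ [x]) ((arr.length:Int) - 1) 0) 2 =
                  PySem.Int.mod x 2) := by
              rw [hlast]
              intro hh
              exact hh.2 (by rw [hq', hx'])
            have hsB : stepB (arr ++ [x])
                ((rsN : Int), ((seN : Int), (neN : Int)), ((soN : Int), (noN : Int)))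
                ((arr.length : Int), x) = ((rsN : Int), ((seN : Int), (neN : Int)), (if (noN : Int) < (arr.length : Int) - (rsN : Int) + 1 then ((rsN : Int), (arr.length : Int) - (rsN : Int) + 1) else ((soN : Int), (noN : Int)))) := by
              simp only [stepB]
              rw [if_neg hcond]
              try rw [if_neg hx]
            have hsA : stepA (List.take neN (List.drop seN arr), List.take noN (List.drop soN arr), [], List.drop rsN arr) x = (List.take neN (List.drop seN arr), (if (List.take noN (List.drop soN arr)).length < (List.drop rsN arr ++ [x]).length then List.drop rsN arr ++ [x] else List.take noN (List.drop soN arr)), [], List.drop rsN arr ++ [x]) := by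
              simp only [stepA]
              try rw [if_neg hx]
            rw [hsA, hsB]
            have hlenA : (List.take noN (List.drop soN arr)).length = noN := take_drop_length _ _ _ hso
            have hlenC : (List.drop rsN arr ++ [x]).length = (arr.length - rsN + 1) := by simp only [List.length_append, List.length_drop, List.length_cons, List.length_nil]; try omega
            have htk : List.take (arr.length - rsN + 1) (List.drop rsN (arr ++ [x])) = List.drop rsN (arr ++ [x]) :=
              List.take_of_length_le (by simp only [List.length_drop, List.length_append, List.length_cons, List.length_nil]; omega)
            have hdx : List.drop rsN arr ++ [x] = (arr ++ [x]).drop rsN := by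
              rw [List.drop_append_of_le_length (by omega)]
            by_cases hu : noN < (arr.length - rsN + 1)
            · have hcmpI : ((noN : Nat) : Int) < (arr.length : Int) - (rsN : Int) + 1 := by omega
              have hcmpL : (List.take noN (List.drop soN arr)).length < (List.drop rsN arr ++ [x]).length := by
                rw [hlenA, hlenC]; exact hu
              refine ⟨rsN, seN, neN, rsN, (arr.length - rsN + 1), ?_, ?_, ?_, ?_, ?_, ?_, ?_⟩
              · have hcast : (((arr.length - rsN + 1) : Nat) : Int) = (arr.length : Int) - (rsN : Int) + 1 := by omega
                rw [if_pos hcmpI, hcast]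
              · rw [hL1]; try omega
              · rw [hL1]; try omega
              · try dsimp only
                exact (slice_append_stable arr x seN neN hse).symm
              · rw [if_pos hcmpL]
                try dsimp only
                rw [htk, hdx]
              · intro hcontra; exact absurd hcontra hnil'
              · intro _
                rw [hL1]
                refine ⟨by omega, ?_⟩
                rw [hlastx, if_neg hx]
                constructor <;> simp [hdx]
            · have hcmpI : ¬ (((noN : Nat) : Int) < (arr.length : Int) - (rsN : Int) + 1) := by omega
              have hcmpL' : ¬ ((List.take noN (List.drop soN arr)).length < (List.drop rsN arr ++ [x]).length) := by
                rw [hlenA, hlenC]; exact hu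
              refine ⟨rsN, seN, neN, soN, noN, ?_, ?_, ?_, ?_, ?_, ?_, ?_⟩
              · rw [if_neg hcmpI]
              · rw [hL1]; try omega
              · rw [hL1]; try omega
              · try dsimp only
                exact (slice_append_stable arr x seN neN hse).symm
              · rw [if_neg hcmpL']
                try dsimp only
                exact (slice_append_stable arr x soN noN hso).symm
              · intro hcontra; exact absurd hcontra hnil'
              · intro _
                rw [hL1]
                refine ⟨by omega, ?_⟩
                rw [hlastx, if_neg hx]
                constructor <;> simp [hdx]

-- ===== VERDICT (by name: the statement is the Claim_ definition above) =====
theorem longest_parity_subsequence_spec : Claim_equal_longest_parity_subsequence := by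
  intro arr _
  unfold Spec_longest_parity_subsequence
  obtain ⟨rsN, seN, neN, soN, noN, hB, hse, hso, hle, hlo, hnil, hcons⟩ := invLPS arr
  by_cases h : arr = []
  · subst h; rfl
  · have hlenE : (arr.foldl stepA ([], [], [], [])).1.length = neN := by
      rw [hle]; exact take_drop_length _ _ _ hse
    have hlenO : (arr.foldl stepA ([], [], [], [])).2.1.length = noN := by
      rw [hlo]; exact take_drop_length _ _ _ hso
    unfold longest_parity_subsequence longest_parity_subsequence_alt
    rw [if_neg h, hB]
    dsimp only
    rw [hlenE, hlenO]
    by_cases hc : noN ≤ neN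
    · rw [if_pos hc, if_pos (by exact_mod_cast hc)]
      dsimp only
      rw [PySem.List.slice_natCast_add, hle]
    · rw [if_neg hc, if_neg (by exact_mod_cast hc)]
      dsimp only
      rw [PySem.List.slice_natCast_add, hlo]
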